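-- pv_equiv track=rewrite | github.com/xigor1337/Advent-of-Code-2023 | 2023/zadanie 7b/camel cards.py | iteration_check
-- ===== SOURCE A (Python) =====
-- def iteration_check(lenght, card):
--     for i in range(len(card)):
--         toak_check = 0
--         for j in range(i, len(card)):
--             if card[i] == card[j]:
--                 toak_check += 1
--             if toak_check == lenght:
--                 return True
--     return False
-- ===== SOURCE B (Python) =====
-- def iteration_check(lenght, card):
--     if lenght < 1:
--         return False
--     counts = {}
--     for c in card:
--         n = counts.get(c, 0) + 1
--         counts[c] = n
--         if n >= lenght:
--             return True
--     return False
-- ===== Notes on version B (the rewrite author's own statement) =====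
-- stated objective: faster
-- what changed: Replaces A's nested quadratic suffix-rescan with a single pass that maintains a frequency dictionary and succeeds as soon as any running count reaches lenght.
import Mathlib
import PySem

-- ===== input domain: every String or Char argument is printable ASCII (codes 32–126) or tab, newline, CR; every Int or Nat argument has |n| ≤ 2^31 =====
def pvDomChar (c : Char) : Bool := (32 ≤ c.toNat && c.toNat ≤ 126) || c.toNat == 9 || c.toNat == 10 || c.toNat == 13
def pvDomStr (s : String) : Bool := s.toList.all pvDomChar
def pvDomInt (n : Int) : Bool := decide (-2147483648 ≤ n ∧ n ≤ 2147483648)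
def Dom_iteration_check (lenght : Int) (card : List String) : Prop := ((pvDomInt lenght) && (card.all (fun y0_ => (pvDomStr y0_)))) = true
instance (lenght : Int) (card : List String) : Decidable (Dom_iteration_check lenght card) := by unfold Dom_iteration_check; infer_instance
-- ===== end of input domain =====

-- B replaces A's nested quadratic suffix-rescan with one counting pass over a
-- frequency dictionary (objective: faster, O(n^2) -> O(n) in Python).

-- ===== PORT A =====
-- inner loop: 'for j in range(i, len(card))' over the suffix, with card[i] = ci
def iterationCheckInner (lenght : Int) (ci : String) : List String → Int → Bool
  | [], _ => false
  | cj :: rest, toak =>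
    let toak' := if ci == cj then toak + 1 else toak
    if toak' == lenght then true else iterationCheckInner lenght ci rest toak'

-- outer loop: 'for i in range(len(card))', i ↦ the suffix card[i:]
def iterationCheckOuter (lenght : Int) : List String → Bool
  | [] => false
  | c :: rest =>
    if iterationCheckInner lenght c (c :: rest) 0 then true
    else iterationCheckOuter lenght rest

def iteration_check (lenght : Int) (card : List String) : Bool :=
  iterationCheckOuter lenght card

-- ===== PORT B =====
def iterationCheckAltGo (lenght : Int) (counts : PySem.Dict String Int) : List String → Bool
  | [] => false
  | c :: rest =>
    let n := counts.getD c 0 + 1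
    let counts' := counts.insert c n
    if lenght ≤ n then true else iterationCheckAltGo lenght counts' rest

def iteration_check_alt (lenght : Int) (card : List String) : Bool :=
  if lenght < 1 then false
  else iterationCheckAltGo lenght PySem.Dict.empty card

-- ===== PRECONDITION & SPEC =====
def Spec_iteration_check (lenght : Int) (card : List String) (out : Bool) : Prop := out = iteration_check_alt lenght card
instance (lenght : Int) (card : List String) (out : Bool) : Decidable (Spec_iteration_check lenght card out) := by unfold Spec_iteration_check; infer_instance

-- ===== CLAIM (what is proved, stated in full; the proofs are below) =====
def Claim_equal_iteration_check : Prop := ∀ (lenght : Int) (card : List String), Dom_iteration_check lenght card → Spec_iteration_check lenght card (iteration_check lenght card)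

-- ===== LEMMAS AND PROOFS =====

theorem innerTrueIff (lenght : Int) (ci : String) (js : List String) :
    ∀ toak : Int, toak < lenght →
      (iterationCheckInner lenght ci js toak = true ↔ lenght ≤ toak + (js.count ci : Int)) := by
  induction js with
  | nil =>
    intro toak h
    simp only [iterationCheckInner, List.count_nil]
    constructor
    · intro hf; exact absurd hf (by simp)
    · intro hle; omega
  | cons cj rest ih =>
    intro toak h
    by_cases hc : ci = cj
    · subst hc
      have hcnt : ((ci :: rest).count ci : Int) = (rest.count ci : Int) + 1 := by
        simp [List.count_cons]
      simp only [iterationCheckInner, BEq.rfl, if_true]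
      by_cases he : toak + 1 = lenght
      · have hb : ((toak + 1 : Int) == lenght) = true := by simp [he]
        simp only [hb, if_true]
        exact iff_of_true trivial (by omega)
      · have hb : ((toak + 1 : Int) == lenght) = false := by simp [he]
        simp only [hb, Bool.false_eq_true, if_false]
        rw [ih (toak + 1) (by omega)]
        omega
    · have hc' : (ci == cj) = false := by simpa using hc
      have hcnt : ((cj :: rest).count ci : Int) = (rest.count ci : Int) := by
        simp [List.count_cons, Ne.symm hc]
      have hb : ((toak : Int) == lenght) = false := by simp; omega
      simp only [iterationCheckInner, hc', Bool.false_eq_true, if_false, hb]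
      rw [ih toak h]
      omega

theorem innerGtFalse (lenght : Int) (ci : String) (js : List String) :
    ∀ toak : Int, lenght < toak → iterationCheckInner lenght ci js toak = false := by
  induction js with
  | nil => intro toak _; rfl
  | cons cj rest ih =>
    intro toak h
    simp only [iterationCheckInner]
    by_cases hc : (ci == cj) = true
    · have hb : ((toak + 1 : Int) == lenght) = false := by simp; omega
      simp only [hc, if_true, hb, Bool.false_eq_true, if_false]
      exact ih (toak + 1) (by omega)
    · have hc' : (ci == cj) = false := by simpa using hc
      have hb : ((toak : Int) == lenght) = false := by simp; omega
      simp only [hc', Bool.false_eq_true, if_false, hb]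
      exact ih toak h

theorem outerNonposFalse (lenght : Int) (card : List String) (h : lenght ≤ 0) :
    iterationCheckOuter lenght card = false := by
  induction card with
  | nil => rfl
  | cons c rest ih =>
    simp only [iterationCheckOuter]
    have h1 : iterationCheckInner lenght c (c :: rest) 0 = false := by
      simp only [iterationCheckInner, BEq.rfl, if_true]
      have hb : ((0 + 1 : Int) == lenght) = false := by simp; omega
      simp only [hb, Bool.false_eq_true, if_false]
      exact innerGtFalse lenght c rest 1 (by omega)
    simp [h1, ih]

theorem outerTrueIff (lenght : Int) (card : List String) (h : 1 ≤ lenght) :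
    iterationCheckOuter lenght card = true ↔
      ∃ c ∈ card, lenght ≤ (card.count c : Int) := by
  induction card with
  | nil => simp [iterationCheckOuter]
  | cons c rest ih =>
    simp only [iterationCheckOuter]
    have hhead := innerTrueIff lenght c (c :: rest) 0 (by omega)
    cases hin : iterationCheckInner lenght c (c :: rest) 0 with
    | true =>
      simp only [if_true, true_iff]
      refine ⟨c, by simp, ?_⟩
      have := hhead.mp hin
      omega
    | false =>
      simp only [Bool.false_eq_true, if_false]
      rw [ih]
      constructor
      · rintro ⟨c', hc', hcnt⟩
        refine ⟨c', by simp [hc'], ?_⟩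
        have : rest.count c' ≤ (c :: rest).count c' := by
          simp [List.count_cons]
        omega
      · rintro ⟨c', hc', hcnt⟩
        rcases List.mem_cons.mp hc' with hceq | hmem
        · subst hceq
          exact absurd (hhead.mpr (by omega)) (by simp [hin])
        · refine ⟨c', hmem, ?_⟩
          by_cases hcc : c' = c
          · subst hcc
            exact absurd (hhead.mpr (by omega)) (by simp [hin])
          · have : ((c :: rest).count c' : Int) = (rest.count c' : Int) := by
              simp [List.count_cons, Ne.symm hcc]
            omega

theorem altGoTrueIff (lenght : Int) (h : 1 ≤ lenght) :
    ∀ (xs : List String) (counts : PySem.Dict String Int),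
      (iterationCheckAltGo lenght counts xs = true ↔
        ∃ c ∈ xs, lenght ≤ counts.getD c 0 + (xs.count c : Int)) := by
  intro xs
  induction xs with
  | nil => intro counts; simp [iterationCheckAltGo]
  | cons c rest ih =>
    intro counts
    simp only [iterationCheckAltGo]
    have hself : ((c :: rest).count c : Int) = (rest.count c : Int) + 1 := by
      simp [List.count_cons]
    by_cases hn : lenght ≤ counts.getD c 0 + 1
    · simp only [hn, if_true, true_iff]
      exact ⟨c, by simp, by omega⟩
    · simp only [hn, if_false]
      rw [ih]
      constructor
      · rintro ⟨c', hc', hcnt⟩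
        refine ⟨c', by simp [hc'], ?_⟩
        by_cases hcc : c' = c
        · subst hcc
          rw [PySem.Dict.getD_insert_self] at hcnt
          omega
        · rw [PySem.Dict.getD_insert_of_ne counts _ 0 hcc] at hcnt
          have : ((c :: rest).count c' : Int) = (rest.count c' : Int) := by
            simp [List.count_cons, Ne.symm hcc]
          omega
      · rintro ⟨c', hc', hcnt⟩
        rcases List.mem_cons.mp hc' with hceq | hmem
        · subst hceq
          have hcr : c' ∈ rest := by
            by_contra hnr
            have h0 : rest.count c' = 0 := List.count_eq_zero.mpr hnr
            rw [hself] at hcnt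
            omega
          refine ⟨c', hcr, ?_⟩
          rw [PySem.Dict.getD_insert_self]
          omega
        · refine ⟨c', hmem, ?_⟩
          by_cases hcc : c' = c
          · subst hcc
            rw [PySem.Dict.getD_insert_self]
            omega
          · rw [PySem.Dict.getD_insert_of_ne counts _ 0 hcc]
            have : ((c :: rest).count c' : Int) = (rest.count c' : Int) := by
              simp [List.count_cons, Ne.symm hcc]
            omega

-- ===== VERDICT (by name: the statement is the Claim_ definition above) =====
theorem iteration_check_spec : Claim_equal_iteration_check := by
  intro lenght card _
  unfold Spec_iteration_check iteration_check iteration_check_alt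
  by_cases h : lenght < 1
  · simp only [h, if_true]
    exact outerNonposFalse lenght card (by omega)
  · simp only [h, if_false]
    have h1 : 1 ≤ lenght := by omega
    have ha := outerTrueIff lenght card h1
    have hb := altGoTrueIff lenght h1 card PySem.Dict.empty
    simp only [PySem.Dict.getD_empty, zero_add] at hb
    rw [Bool.eq_iff_iff, ha, hb]
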